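-- pv_equiv track=rewrite | github.com/RamPrasath-12/ShopWhatYouSee | backend/models/color_mapper.py | get_color_family
-- ===== SOURCE A (Python) =====
-- def get_color_family(color_name: str) -> str:
--     """Get the color family (e.g., 'navy' → 'blue')."""
--     families = {
--         "red": ["red", "crimson", "maroon", "burgundy", "coral", "salmon", "rose", "wine", "rust", "cherry"],
--         "pink": ["pink", "hot pink", "blush", "magenta", "fuchsia", "dusty pink"],
--         "orange": ["orange", "peach", "tangerine", "burnt orange", "apricot"],
--         "yellow": ["yellow", "gold", "mustard", "lemon", "cream", "amber"],
--         "green": ["green", "olive", "forest green", "mint", "sage", "teal", "emerald", "lime", "khaki", "sea green"],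
--         "blue": ["blue", "navy", "royal blue", "sky blue", "baby blue", "cobalt", "turquoise", "aqua", "indigo", "denim", "powder blue", "steel blue"],
--         "purple": ["purple", "lavender", "violet", "plum", "mauve", "lilac", "grape", "orchid"],
--         "brown": ["brown", "tan", "beige", "chocolate", "camel", "coffee", "taupe", "chestnut"],
--         "neutral": ["black", "charcoal", "dark grey", "grey", "light grey", "silver", "white", "off-white", "ivory"],
--         "metallic": ["gold metallic", "silver metallic", "bronze"],
--     }
--
--     for family, members in families.items():
--         if color_name.lower() in members:
--             return family
--     return "unknown"
-- ===== SOURCE B (Python) =====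
-- _COLOR_TO_FAMILY = {
--     "red": "red",
--     "crimson": "red",
--     "maroon": "red",
--     "burgundy": "red",
--     "coral": "red",
--     "salmon": "red",
--     "rose": "red",
--     "wine": "red",
--     "rust": "red",
--     "cherry": "red",
--     "pink": "pink",
--     "hot pink": "pink",
--     "blush": "pink",
--     "magenta": "pink",
--     "fuchsia": "pink",
--     "dusty pink": "pink",
--     "orange": "orange",
--     "peach": "orange",
--     "tangerine": "orange",
--     "burnt orange": "orange",
--     "apricot": "orange",
--     "yellow": "yellow",
--     "gold": "yellow",
--     "mustard": "yellow",
--     "lemon": "yellow",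
--     "cream": "yellow",
--     "amber": "yellow",
--     "green": "green",
--     "olive": "green",
--     "forest green": "green",
--     "mint": "green",
--     "sage": "green",
--     "teal": "green",
--     "emerald": "green",
--     "lime": "green",
--     "khaki": "green",
--     "sea green": "green",
--     "blue": "blue",
--     "navy": "blue",
--     "royal blue": "blue",
--     "sky blue": "blue",
--     "baby blue": "blue",
--     "cobalt": "blue",
--     "turquoise": "blue",
--     "aqua": "blue",
--     "indigo": "blue",
--     "denim": "blue",
--     "powder blue": "blue",
--     "steel blue": "blue",
--     "purple": "purple",
--     "lavender": "purple",
--     "violet": "purple",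
--     "plum": "purple",
--     "mauve": "purple",
--     "lilac": "purple",
--     "grape": "purple",
--     "orchid": "purple",
--     "brown": "brown",
--     "tan": "brown",
--     "beige": "brown",
--     "chocolate": "brown",
--     "camel": "brown",
--     "coffee": "brown",
--     "taupe": "brown",
--     "chestnut": "brown",
--     "black": "neutral",
--     "charcoal": "neutral",
--     "dark grey": "neutral",
--     "grey": "neutral",
--     "light grey": "neutral",
--     "silver": "neutral",
--     "white": "neutral",
--     "off-white": "neutral",
--     "ivory": "neutral",
--     "gold metallic": "metallic",
--     "silver metallic": "metallic",
--     "bronze": "metallic",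
-- }
--
--
-- def get_color_family(color_name: str) -> str:
--     """Get the color family (e.g., 'navy' → 'blue')."""
--     return _COLOR_TO_FAMILY.get(color_name.lower(), "unknown")
-- ===== Notes on version B (the rewrite author's own statement) =====
-- stated objective: faster
-- what changed: Replaces A's per-call scan over the nested family->members table with a flat color->family inverted dict written out directly; each call is a single hash lookup with a default instead of a loop with inner list-membership tests.
import Mathlib
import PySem

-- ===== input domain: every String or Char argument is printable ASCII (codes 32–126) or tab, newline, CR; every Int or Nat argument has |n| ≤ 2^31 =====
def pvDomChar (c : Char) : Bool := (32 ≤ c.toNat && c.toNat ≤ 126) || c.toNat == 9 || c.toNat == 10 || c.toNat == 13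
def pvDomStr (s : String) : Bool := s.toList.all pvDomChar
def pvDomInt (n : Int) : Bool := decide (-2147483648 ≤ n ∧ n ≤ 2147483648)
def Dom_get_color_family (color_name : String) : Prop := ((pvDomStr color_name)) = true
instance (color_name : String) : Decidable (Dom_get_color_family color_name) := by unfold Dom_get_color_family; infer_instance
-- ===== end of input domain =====

-- ===== PORT A =====
-- B replaces A's per-call loop over the nested family table with a flat
-- color->family inverted dict and a single lookup with default; return value only.

-- A's families dict, as an association list in insertion order.
def pvFamiliesA : List (String × List String) :=
  [("red", ["red", "crimson", "maroon", "burgundy", "coral", "salmon", "rose", "wine", "rust", "cherry"]),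
   ("pink", ["pink", "hot pink", "blush", "magenta", "fuchsia", "dusty pink"]),
   ("orange", ["orange", "peach", "tangerine", "burnt orange", "apricot"]),
   ("yellow", ["yellow", "gold", "mustard", "lemon", "cream", "amber"]),
   ("green", ["green", "olive", "forest green", "mint", "sage", "teal", "emerald", "lime", "khaki", "sea green"]),
   ("blue", ["blue", "navy", "royal blue", "sky blue", "baby blue", "cobalt", "turquoise", "aqua", "indigo", "denim", "powder blue", "steel blue"]),
   ("purple", ["purple", "lavender", "violet", "plum", "mauve", "lilac", "grape", "orchid"]),
   ("brown", ["brown", "tan", "beige", "chocolate", "camel", "coffee", "taupe", "chestnut"]),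
   ("neutral", ["black", "charcoal", "dark grey", "grey", "light grey", "silver", "white", "off-white", "ivory"]),
   ("metallic", ["gold metallic", "silver metallic", "bronze"])]

-- the 'for family, members in families.items(): if … : return family' loop
def pvLoopA (t : String) : List (String × List String) → String
  | [] => "unknown"
  | (fam, members) :: rest =>
      if members.contains t then fam else pvLoopA t rest

def get_color_family (color_name : String) : String :=
  pvLoopA (PySem.Str.lower color_name) pvFamiliesA

-- ===== PORT B =====
-- Source B's module-level flat dict literal _COLOR_TO_FAMILY
def pvColorToFamily : PySem.Dict String String :=
  PySem.Dict.ofList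
  [   ("red", "red"),
   ("crimson", "red"),
   ("maroon", "red"),
   ("burgundy", "red"),
   ("coral", "red"),
   ("salmon", "red"),
   ("rose", "red"),
   ("wine", "red"),
   ("rust", "red"),
   ("cherry", "red"),
   ("pink", "pink"),
   ("hot pink", "pink"),
   ("blush", "pink"),
   ("magenta", "pink"),
   ("fuchsia", "pink"),
   ("dusty pink", "pink"),
   ("orange", "orange"),
   ("peach", "orange"),
   ("tangerine", "orange"),
   ("burnt orange", "orange"),
   ("apricot", "orange"),
   ("yellow", "yellow"),
   ("gold", "yellow"),
   ("mustard", "yellow"),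
   ("lemon", "yellow"),
   ("cream", "yellow"),
   ("amber", "yellow"),
   ("green", "green"),
   ("olive", "green"),
   ("forest green", "green"),
   ("mint", "green"),
   ("sage", "green"),
   ("teal", "green"),
   ("emerald", "green"),
   ("lime", "green"),
   ("khaki", "green"),
   ("sea green", "green"),
   ("blue", "blue"),
   ("navy", "blue"),
   ("royal blue", "blue"),
   ("sky blue", "blue"),
   ("baby blue", "blue"),
   ("cobalt", "blue"),
   ("turquoise", "blue"),
   ("aqua", "blue"),
   ("indigo", "blue"),
   ("denim", "blue"),
   ("powder blue", "blue"),
   ("steel blue", "blue"),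
   ("purple", "purple"),
   ("lavender", "purple"),
   ("violet", "purple"),
   ("plum", "purple"),
   ("mauve", "purple"),
   ("lilac", "purple"),
   ("grape", "purple"),
   ("orchid", "purple"),
   ("brown", "brown"),
   ("tan", "brown"),
   ("beige", "brown"),
   ("chocolate", "brown"),
   ("camel", "brown"),
   ("coffee", "brown"),
   ("taupe", "brown"),
   ("chestnut", "brown"),
   ("black", "neutral"),
   ("charcoal", "neutral"),
   ("dark grey", "neutral"),
   ("grey", "neutral"),
   ("light grey", "neutral"),
   ("silver", "neutral"),
   ("white", "neutral"),
   ("off-white", "neutral"),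
   ("ivory", "neutral"),
   ("gold metallic", "metallic"),
   ("silver metallic", "metallic"),
   ("bronze", "metallic")]

def get_color_family_alt (color_name : String) : String :=
  pvColorToFamily.getD (PySem.Str.lower color_name) "unknown"

-- ===== PRECONDITION & SPEC =====
def Spec_get_color_family (color_name : String) (out : String) : Prop := out = get_color_family_alt color_name
instance (color_name : String) (out : String) : Decidable (Spec_get_color_family color_name out) := by unfold Spec_get_color_family; infer_instance

-- ===== CLAIM (what is proved, stated in full; the proofs are below) =====
def Claim_equal_get_color_family : Prop := ∀ (color_name : String), Dom_get_color_family color_name → Spec_get_color_family color_name (get_color_family color_name)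

-- ===== LEMMAS AND PROOFS =====

-- first-match association lookup
def pvAssocGet (t : String) : List (String × String) → Option String
  | [] => none
  | (k, v) :: rest => if k == t then some v else pvAssocGet t rest

theorem pvAssocGet_mk (t : String) (ps : List (String × String)) :
    (PySem.Dict.mk ps).get? t = pvAssocGet t ps := by
  induction ps with
  | nil => rfl
  | cons p rest ih =>
      obtain ⟨k, v⟩ := p
      rw [PySem.Dict.get?_mk_cons, pvAssocGet, ih]

theorem pvAssocGet_family (t fam : String) (ms : List String) (rest : List (String × String)) :
    pvAssocGet t (ms.map (fun m => (m, fam)) ++ rest)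
      = if ms.contains t then some fam else pvAssocGet t rest := by
  induction ms with
  | nil => simp
  | cons m ms ih =>
      simp only [List.map_cons, List.cons_append, pvAssocGet, List.contains_cons, ih]
      by_cases hm : m = t
      · simp [hm]
      · simp [hm, Ne.symm hm]

theorem pvAssocGet_flat (t : String) (fams : List (String × List String)) :
    (pvAssocGet t (fams.flatMap (fun p => p.2.map (fun m => (m, p.1))))).getD "unknown"
      = pvLoopA t fams := by
  induction fams with
  | nil => rfl
  | cons p rest ih =>
      obtain ⟨fam, ms⟩ := p
      rw [List.flatMap_cons, pvAssocGet_family, pvLoopA]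
      split <;> simp [ih]

-- the dict literal's item list is exactly the flattened A table (first-wins; keys are distinct)
set_option maxRecDepth 4096 in
theorem pvIndex_items :
    pvColorToFamily
      = PySem.Dict.mk (pvFamiliesA.flatMap (fun p => p.2.map (fun m => (m, p.1)))) := by
  decide

-- ===== VERDICT (by name: the statement is the Claim_ definition above) =====
theorem get_color_family_spec : Claim_equal_get_color_family := by
  intro color_name _
  show get_color_family color_name = get_color_family_alt color_name
  unfold get_color_family get_color_family_alt
  rw [PySem.Dict.getD_eq_get?_getD, pvIndex_items, pvAssocGet_mk, pvAssocGet_flat]
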